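-- pv_equiv track=rewrite | github.com/anastasia-dg/AyED1-2024-TPs | TP04/ejercicio7.py | eliminar_subcadena_sin_rebanadas
-- ===== SOURCE A (Python) =====
-- def eliminar_subcadena_sin_rebanadas(cadena, inicio, longitud):
--
--
--
--     if 0 <= inicio < len(cadena) and 0 <= longitud <= len(cadena) - inicio:
--         nueva_cadena = ""
--         for i in range(len(cadena)):
--             if i < inicio or i >= inicio + longitud:
--                 nueva_cadena += cadena[i]
--         return nueva_cadena
--     else:
--         return "Error: Índices fuera de rango."
-- ===== SOURCE B (Python) =====
-- def eliminar_subcadena_sin_rebanadas(cadena, inicio, longitud):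
--     if 0 <= inicio < len(cadena) and 0 <= longitud <= len(cadena) - inicio:
--         return cadena[:inicio] + cadena[inicio + longitud:]
--     else:
--         return "Error: Índices fuera de rango."
-- ===== Notes on version B (the rewrite author's own statement) =====
-- stated objective: simpler
-- what changed: Replaces the per-index loop with a per-character keep/skip conditional by a direct concatenation of the prefix slice cadena[:inicio] and the suffix slice cadena[inicio+longitud:], keeping the identical bounds guard and error string.
import Mathlib
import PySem

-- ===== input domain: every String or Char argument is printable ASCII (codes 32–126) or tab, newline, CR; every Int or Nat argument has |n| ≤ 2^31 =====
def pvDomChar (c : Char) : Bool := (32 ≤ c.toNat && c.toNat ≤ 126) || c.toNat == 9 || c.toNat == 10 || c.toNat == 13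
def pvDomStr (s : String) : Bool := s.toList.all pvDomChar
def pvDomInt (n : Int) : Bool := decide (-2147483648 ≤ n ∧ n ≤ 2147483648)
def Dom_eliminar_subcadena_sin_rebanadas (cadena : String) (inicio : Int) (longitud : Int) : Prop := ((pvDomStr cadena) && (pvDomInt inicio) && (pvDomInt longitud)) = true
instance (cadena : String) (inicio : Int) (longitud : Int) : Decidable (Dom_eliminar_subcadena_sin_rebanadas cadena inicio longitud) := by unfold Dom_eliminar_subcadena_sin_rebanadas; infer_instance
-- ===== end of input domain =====

-- B replaces A's per-index loop by the concatenation of the prefix and suffix slices (same guard, same error string): simpler and with fewer passes.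

-- ===== PORT A =====
-- literal port of A: guard, then an index loop 'for i in range(len(cadena))' appending cadena[i] when i is outside [inicio, inicio+longitud)
def eliminar_subcadena_sin_rebanadas (cadena : String) (inicio : Int) (longitud : Int) : String :=
  if 0 ≤ inicio ∧ inicio < PySem.Str.len cadena ∧ 0 ≤ longitud ∧ longitud ≤ PySem.Str.len cadena - inicio then
    String.ofList ((PySem.List.pyRange 0 (PySem.Str.len cadena) 1).foldl
      (fun acc i => if i < inicio ∨ inicio + longitud ≤ i then acc ++ [PySem.List.pyGetD cadena.toList i ' '] else acc) [])
  else "Error: Índices fuera de rango."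

-- ===== PORT B =====
-- literal port of B: same guard, then cadena[:inicio] + cadena[inicio+longitud:]
def eliminar_subcadena_sin_rebanadas_alt (cadena : String) (inicio : Int) (longitud : Int) : String :=
  if 0 ≤ inicio ∧ inicio < PySem.Str.len cadena ∧ 0 ≤ longitud ∧ longitud ≤ PySem.Str.len cadena - inicio then
    String.ofList (PySem.List.slice cadena.toList none (some inicio) ++
                   PySem.List.slice cadena.toList (some (inicio + longitud)) none)
  else "Error: Índices fuera de rango."

-- ===== PRECONDITION & SPEC =====
def Spec_eliminar_subcadena_sin_rebanadas (cadena : String) (inicio : Int) (longitud : Int) (out : String) : Prop := out = eliminar_subcadena_sin_rebanadas_alt cadena inicio longitud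
instance (cadena : String) (inicio : Int) (longitud : Int) (out : String) : Decidable (Spec_eliminar_subcadena_sin_rebanadas cadena inicio longitud out) := by unfold Spec_eliminar_subcadena_sin_rebanadas; infer_instance

-- ===== CLAIM (what is proved, stated in full; the proofs are below) =====
def Claim_equal_eliminar_subcadena_sin_rebanadas : Prop := ∀ (cadena : String) (inicio : Int) (longitud : Int), Dom_eliminar_subcadena_sin_rebanadas cadena inicio longitud → Spec_eliminar_subcadena_sin_rebanadas cadena inicio longitud (eliminar_subcadena_sin_rebanadas cadena inicio longitud)

-- ===== LEMMAS AND PROOFS =====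

-- the loop 'if p i: out += [f i]' is append-of-filter
lemma foldl_append_ite_map {α β : Type} (p : α → Prop) [DecidablePred p] (f : α → β)
    (l : List α) (acc : List β) :
    l.foldl (fun acc x => if p x then acc ++ [f x] else acc) acc
      = acc ++ (l.filter (fun x => decide (p x))).map f := by
  induction l generalizing acc with
  | nil => simp
  | cons x xs ih =>
    simp only [List.foldl_cons, List.filter_cons]
    by_cases h : p x <;> simp [h, ih]

-- an initial segment of indices read back through pyGetD is take
lemma map_pyGetD_range_take (cs : List Char) (d : Char) (m : Nat) (h : m ≤ cs.length) :
    (List.range m).map (fun k : Nat => PySem.List.pyGetD cs (k : Int) d) = cs.take m := by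
  induction m with
  | zero => simp
  | succ m ih =>
    rw [List.range_succ, List.map_append, ih (by omega)]
    have hm : m < cs.length := by omega
    rw [List.map_singleton, PySem.List.pyGetD_natCast, List.take_add_one,
        List.getElem?_eq_getElem hm]
    simp [List.getD_eq_getElem?_getD, List.getElem?_eq_getElem hm]

theorem eliminar_subcadena_sin_rebanadas_spec : Claim_equal_eliminar_subcadena_sin_rebanadas := by
  intro cadena inicio longitud _
  unfold Spec_eliminar_subcadena_sin_rebanadas
  unfold eliminar_subcadena_sin_rebanadas eliminar_subcadena_sin_rebanadas_alt
  by_cases hg : 0 ≤ inicio ∧ inicio < PySem.Str.len cadena ∧ 0 ≤ longitud ∧ longitud ≤ PySem.Str.len cadena - inicio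
  · rw [if_pos hg, if_pos hg]
    obtain ⟨h0, h1, h2, h3⟩ := hg
    set cs := cadena.toList with hcs
    have hlen : PySem.Str.len cadena = (cs.length : Int) := by
      simp [PySem.Str.len_eq, hcs]
    rw [hlen] at h1 h3 ⊢
    congr 1
    -- split the range at inicio and at inicio + longitud
    rw [foldl_append_ite_map]
    rw [PySem.List.pyRange_one_append 0 inicio (cs.length : Int) h0 (by omega),
        PySem.List.pyRange_one_append inicio (inicio + longitud) (cs.length : Int) (by omega) (by omega)]
    rw [List.filter_append, List.filter_append]
    have hfilt1 : (PySem.List.pyRange 0 inicio 1).filter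
        (fun x => decide (x < inicio ∨ inicio + longitud ≤ x)) = PySem.List.pyRange 0 inicio 1 := by
      refine List.filter_eq_self.mpr ?_
      intro x hx
      have := (PySem.List.mem_pyRange_one).mp hx
      simp; omega
    have hfilt2 : (PySem.List.pyRange inicio (inicio + longitud) 1).filter
        (fun x => decide (x < inicio ∨ inicio + longitud ≤ x)) = [] := by
      refine List.filter_eq_nil_iff.mpr ?_
      intro x hx
      have := (PySem.List.mem_pyRange_one).mp hx
      simp; omega
    have hfilt3 : (PySem.List.pyRange (inicio + longitud) (cs.length : Int) 1).filter
        (fun x => decide (x < inicio ∨ inicio + longitud ≤ x)) = PySem.List.pyRange (inicio + longitud) (cs.length : Int) 1 := by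
      refine List.filter_eq_self.mpr ?_
      intro x hx
      have := (PySem.List.mem_pyRange_one).mp hx
      simp; omega
    rw [hfilt1, hfilt2, hfilt3]
    simp only [List.map_append, List.nil_append]
    -- suffix: map of pyGetD over pyRange a (length) is drop
    have hsuffix : (PySem.List.pyRange (inicio + longitud) (cs.length : Int) 1).map
        (fun j => PySem.List.pyGetD cs j ' ') = cs.drop (inicio + longitud).toNat :=
      by apply PySem.List.map_pyGetD_pyRange'; omega
    -- prefix: map of pyGetD over pyRange 0 inicio is take
    have hprefix : (PySem.List.pyRange 0 inicio 1).map
        (fun j => PySem.List.pyGetD cs j ' ') = cs.take inicio.toNat := by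
      rw [PySem.List.pyRange_one, List.map_map]
      have : ((fun j => PySem.List.pyGetD cs j ' ') ∘ fun k : Nat => (0 : Int) + (k : Int))
          = fun k : Nat => PySem.List.pyGetD cs (k : Int) ' ' := by
        funext k; simp
      rw [show ((inicio - 0).toNat) = inicio.toNat by omega, this,
          map_pyGetD_range_take cs ' ' inicio.toNat (by omega)]
    rw [hprefix, hsuffix,
        PySem.List.slice_to cs h0,
        PySem.List.slice_from cs (by omega : (0:Int) ≤ inicio + longitud)]
  · rw [if_neg hg, if_neg hg]
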